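-- pv_equiv track=rewrite | github.com/e-south/dnadesign | src/dnadesign/ops/orchestrator/state.py | _normalize_hold_jid
-- ===== SOURCE A (Python) =====
-- from typing import Literal, Sequence
--
-- def _normalize_hold_jid(active_job_ids: Sequence[str]) -> str | None:
--     normalized: list[str] = []
--     seen: set[str] = set()
--     for job_id in active_job_ids:
--         for value in str(job_id).split(","):
--             token = value.strip()
--             if not token or token in seen:
--                 continue
--             seen.add(token)
--             normalized.append(token)
--     if not normalized:
--         return None
--     return ",".join(sorted(normalized))
-- ===== SOURCE B (Python) =====
-- def _normalize_hold_jid(active_job_ids):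
--     tokens = []
--     for job_id in active_job_ids:
--         for value in str(job_id).split(","):
--             token = value.strip()
--             if token:
--                 tokens.append(token)
--     tokens.sort()
--     unique = []
--     prev = None
--     for token in tokens:
--         if token != prev:
--             unique.append(token)
--             prev = token
--     if not unique:
--         return None
--     return ",".join(unique)
-- ===== Notes on version B (the rewrite author's own statement) =====
-- stated objective: alternative
-- what changed: Replaces A's hash-set first-occurrence dedup followed by a sort with collecting all tokens (duplicates included), sorting once, and removing adjacent duplicates in a single pass over the sorted list.
import Mathlib
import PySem

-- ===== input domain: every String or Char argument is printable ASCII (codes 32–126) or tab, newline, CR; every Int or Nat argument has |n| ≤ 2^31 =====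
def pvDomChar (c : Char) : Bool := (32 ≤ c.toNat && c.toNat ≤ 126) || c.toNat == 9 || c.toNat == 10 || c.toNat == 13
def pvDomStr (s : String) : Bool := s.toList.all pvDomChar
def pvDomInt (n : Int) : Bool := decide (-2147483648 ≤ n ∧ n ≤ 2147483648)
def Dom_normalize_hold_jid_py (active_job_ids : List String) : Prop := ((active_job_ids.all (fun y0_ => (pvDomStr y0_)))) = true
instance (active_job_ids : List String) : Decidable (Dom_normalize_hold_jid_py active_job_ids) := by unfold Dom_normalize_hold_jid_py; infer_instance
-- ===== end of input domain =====

-- B replaces A's hash-set dedup-then-sort with sort-all-tokens-then-drop-adjacent-duplicates; same return value.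

-- ===== PORT A =====
-- nested loops: outer over job ids, inner over comma-split pieces, keeping (normalized, seen)
def normalize_hold_jid_py (active_job_ids : List String) : Option String :=
  let st := active_job_ids.foldl
    (fun (st : List String × PySem.Set String) job_id =>
      ((PySem.Str.split? job_id ",").getD []).foldl
        (fun (st : List String × PySem.Set String) value =>
          let token := PySem.Str.strip value
          if token = "" ∨ token ∈ st.2 then st
          else (st.1 ++ [token], PySem.Set.add st.2 token)) st)
    ([], PySem.Set.ofList [])
  if st.1 = [] then none
  else some (PySem.Str.join "," (PySem.List.sorted st.1 (fun x => x) false))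

-- ===== PORT B =====
-- collect every non-empty stripped token (with duplicates), sort, then one adjacent-dedup pass
def normalize_hold_jid_py_alt (active_job_ids : List String) : Option String :=
  let tokens := active_job_ids.foldl
    (fun (acc : List String) job_id =>
      ((PySem.Str.split? job_id ",").getD []).foldl
        (fun (acc : List String) value =>
          let token := PySem.Str.strip value
          if token ≠ "" then acc ++ [token] else acc) acc) []
  let tokens := PySem.List.sorted tokens (fun x => x) false
  let st := tokens.foldl
    (fun (st : List String × Option String) token =>
      if some token ≠ st.2 then (st.1 ++ [token], some token) else st)
    ([], none)
  if st.1 = [] then none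
  else some (PySem.Str.join "," st.1)

-- ===== PRECONDITION & SPEC =====
def Spec_normalize_hold_jid_py (active_job_ids : List String) (out : Option String) : Prop := out = normalize_hold_jid_py_alt active_job_ids
instance (active_job_ids : List String) (out : Option String) : Decidable (Spec_normalize_hold_jid_py active_job_ids out) := by unfold Spec_normalize_hold_jid_py; infer_instance

-- ===== CLAIM (what is proved, stated in full; the proofs are below) =====
def Claim_equal_normalize_hold_jid_py : Prop := ∀ (active_job_ids : List String), Dom_normalize_hold_jid_py active_job_ids → Spec_normalize_hold_jid_py active_job_ids (normalize_hold_jid_py active_job_ids)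

-- ===== LEMMAS AND PROOFS =====

-- A's per-token step and B's collection step, named for the proofs
def pvStepA (st : List String × PySem.Set String) (value : String) : List String × PySem.Set String :=
  let token := PySem.Str.strip value
  if token = "" ∨ token ∈ st.2 then st
  else (st.1 ++ [token], PySem.Set.add st.2 token)

def pvStepB (acc : List String) (value : String) : List String :=
  let token := PySem.Str.strip value
  if token ≠ "" then acc ++ [token] else acc

-- adjacent-dedup recursion equivalent to B's final fold
def pvDD (prev : Option String) : List String → List String
  | [] => []
  | t :: ts => if some t ≠ prev then t :: pvDD (some t) ts else pvDD prev ts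

theorem pvDD_cons_eq (t : String) (prev : Option String) (ts : List String)
    (h : some t = prev) : pvDD prev (t :: ts) = pvDD prev ts := by
  simp [pvDD, h]

theorem pvDD_cons_ne (t : String) (prev : Option String) (ts : List String)
    (h : ¬ some t = prev) : pvDD prev (t :: ts) = t :: pvDD (some t) ts := by
  simp only [pvDD]
  rw [if_pos h]

theorem pv_flatten {σ : Type} (f : σ → String → σ) (g : String → List String) :
    ∀ (ids : List String) (st : σ),
      ids.foldl (fun st j => (g j).foldl f st) st = (ids.flatMap g).foldl f st := by
  intro ids
  induction ids with
  | nil => intro st; simp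
  | cons j ids ih => intro st; simp [List.foldl_append, ih]

theorem pv_B_collect : ∀ (vals acc : List String),
    vals.foldl pvStepB acc = acc ++ (vals.map PySem.Str.strip).filter (fun t => t ≠ "") := by
  intro vals
  induction vals with
  | nil => intro acc; simp
  | cons v vals ih =>
    intro acc
    simp only [List.foldl_cons, List.map_cons, List.filter_cons, pvStepB]
    by_cases h : PySem.Str.strip v = "" <;> simp [h, ih, List.append_assoc]

theorem pv_B_dd : ∀ (ts : List String) (acc : List String) (prev : Option String),
    (ts.foldl (fun (st : List String × Option String) token =>
      if some token ≠ st.2 then (st.1 ++ [token], some token) else st) (acc, prev)).1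
      = acc ++ pvDD prev ts := by
  intro ts
  induction ts with
  | nil => intro acc prev; simp [pvDD]
  | cons t ts ih =>
    intro acc prev
    rw [List.foldl_cons]
    by_cases h : some t = prev
    · rw [if_neg (not_not_intro h), ih, pvDD_cons_eq t prev ts h]
    · rw [if_pos h, ih, pvDD_cons_ne t prev ts h, List.append_assoc,
        List.singleton_append]

theorem pv_A_invariant : ∀ (vals : List String) (norm : List String) (seen : PySem.Set String),
    norm.Nodup → (∀ x, x ∈ seen ↔ x ∈ norm) →
    (vals.foldl pvStepA (norm, seen)).1.Nodup ∧
    (∀ x, x ∈ (vals.foldl pvStepA (norm, seen)).1 ↔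
      x ∈ norm ∨ x ∈ (vals.map PySem.Str.strip).filter (fun t => t ≠ "")) := by
  intro vals
  induction vals with
  | nil => intro norm seen h1 h2; simp [h1]
  | cons v vals ih =>
    intro norm seen h1 h2
    simp only [List.foldl_cons, List.map_cons]
    by_cases hx : PySem.Str.strip v = ""
    · have hs : pvStepA (norm, seen) v = (norm, seen) := by
        simp only [pvStepA]; rw [if_pos (Or.inl hx)]
      have hf : (PySem.Str.strip v :: List.map PySem.Str.strip vals).filter (fun t => t ≠ "")
          = (List.map PySem.Str.strip vals).filter (fun t => t ≠ "") := by
        simp [hx]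
      rw [hs, hf]
      exact ih norm seen h1 h2
    · have hf : (PySem.Str.strip v :: List.map PySem.Str.strip vals).filter (fun t => t ≠ "")
          = PySem.Str.strip v :: (List.map PySem.Str.strip vals).filter (fun t => t ≠ "") := by
        simp [hx]
      rw [hf]
      by_cases hseen : PySem.Str.strip v ∈ seen
      · have hs : pvStepA (norm, seen) v = (norm, seen) := by
          simp only [pvStepA]; rw [if_pos (Or.inr hseen)]
        rw [hs]
        obtain ⟨hn, hm⟩ := ih norm seen h1 h2
        refine ⟨hn, fun x => ?_⟩
        rw [hm x]
        have hvn : PySem.Str.strip v ∈ norm := (h2 _).mp hseen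
        constructor
        · rintro (hh | hh)
          · exact Or.inl hh
          · exact Or.inr (List.mem_cons_of_mem _ hh)
        · rintro (hh | hh)
          · exact Or.inl hh
          · rcases List.mem_cons.mp hh with hh | hh
            · exact Or.inl (hh ▸ hvn)
            · exact Or.inr hh
      · have hs : pvStepA (norm, seen) v
            = (norm ++ [PySem.Str.strip v], PySem.Set.add seen (PySem.Str.strip v)) := by
          simp only [pvStepA]
          rw [if_neg]
          push_neg
          exact ⟨hx, hseen⟩
        rw [hs]
        have hnotin : PySem.Str.strip v ∉ norm := fun h => hseen ((h2 _).mpr h)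
        have h1' : (norm ++ [PySem.Str.strip v]).Nodup :=
          h1.append (List.nodup_singleton _)
            (fun a ha hb => hnotin ((List.mem_singleton.mp hb) ▸ ha))
        have h2' : ∀ x, x ∈ PySem.Set.add seen (PySem.Str.strip v) ↔
            x ∈ norm ++ [PySem.Str.strip v] := by
          intro x
          rw [PySem.Set.mem_add, List.mem_append, List.mem_singleton, h2 x]
        obtain ⟨hn, hm⟩ := ih _ _ h1' h2'
        refine ⟨hn, fun x => ?_⟩
        rw [hm x, List.mem_append, List.mem_singleton, List.mem_cons]
        constructor
        · rintro ((hh | hh) | hh)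
          · exact Or.inl hh
          · exact Or.inr (Or.inl hh)
          · exact Or.inr (Or.inr hh)
        · rintro (hh | hh | hh)
          · exact Or.inl (Or.inl hh)
          · exact Or.inl (Or.inr hh)
          · exact Or.inr hh

theorem pv_dd_mem : ∀ (ts : List String) (prev : Option String) (x : String),
    x ∈ pvDD prev ts ∨ some x = prev ↔ x ∈ ts ∨ some x = prev := by
  intro ts
  induction ts with
  | nil => intro prev x; simp [pvDD]
  | cons t ts ih =>
    intro prev x
    by_cases h : some t = prev
    · rw [pvDD_cons_eq t prev ts h, ih prev x, List.mem_cons]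
      constructor
      · rintro (hh | hh)
        · exact Or.inl (Or.inr hh)
        · exact Or.inr hh
      · rintro ((hh | hh) | hh)
        · right; rw [hh]; exact h
        · exact Or.inl hh
        · exact Or.inr hh
    · rw [pvDD_cons_ne t prev ts h, List.mem_cons, List.mem_cons]
      constructor
      · rintro ((hh | hh) | hh)
        · exact Or.inl (Or.inl hh)
        · rcases (ih (some t) x).mp (Or.inl hh) with h3 | h3
          · exact Or.inl (Or.inr h3)
          · exact Or.inl (Or.inl (Option.some_inj.mp h3))
        · exact Or.inr hh
      · rintro ((hh | hh) | hh)
        · exact Or.inl (Or.inl hh)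
        · rcases (ih (some t) x).mpr (Or.inl hh) with h3 | h3
          · exact Or.inl (Or.inr h3)
          · exact Or.inl (Or.inl (Option.some_inj.mp h3))
        · exact Or.inr hh

theorem pv_dd_strict : ∀ (ts : List String) (prev : Option String),
    ts.Pairwise (· ≤ ·) → (∀ p, prev = some p → ∀ y ∈ ts, p ≤ y) →
    (pvDD prev ts).Pairwise (· < ·) ∧
    (∀ y ∈ pvDD prev ts, y ∈ ts ∧ ∀ p, prev = some p → p < y) := by
  intro ts
  induction ts with
  | nil => intro prev _ _; simp [pvDD]
  | cons t ts ih =>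
    intro prev hpw hp
    have hhead : ∀ y ∈ ts, t ≤ y := (List.pairwise_cons.mp hpw).1
    have htl : ts.Pairwise (· ≤ ·) := (List.pairwise_cons.mp hpw).2
    by_cases h : some t = prev
    · rw [pvDD_cons_eq t prev ts h]
      obtain ⟨hd1, hd2⟩ := ih prev htl
        (fun p hpp y hy => hp p hpp y (List.mem_cons_of_mem _ hy))
      refine ⟨hd1, fun y hy => ?_⟩
      obtain ⟨hy1, hy2⟩ := hd2 y hy
      exact ⟨List.mem_cons_of_mem _ hy1, hy2⟩
    · rw [pvDD_cons_ne t prev ts h]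
      obtain ⟨hd1, hd2⟩ := ih (some t) htl
        (fun p hpp y hy => by rw [Option.some_inj] at hpp; subst hpp; exact hhead y hy)
      constructor
      · rw [List.pairwise_cons]
        refine ⟨fun y hy => ?_, hd1⟩
        exact (hd2 y hy).2 t rfl
      · intro y hy
        rcases List.mem_cons.mp hy with hy | hy
        · subst hy
          refine ⟨List.mem_cons_self, fun p hpp => ?_⟩
          subst hpp
          have hle : p ≤ y := hp p rfl y List.mem_cons_self
          have hne : p ≠ y := fun hEq => h (by rw [hEq])
          exact lt_of_le_of_ne hle hne
        · obtain ⟨hy1, hy2⟩ := hd2 y hy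
          refine ⟨List.mem_cons_of_mem _ hy1, fun p hpp => ?_⟩
          subst hpp
          have h2 : t < y := hy2 t rfl
          exact lt_of_le_of_lt (hp p rfl t List.mem_cons_self) h2

-- sorted of a nodup list = adjacent-dedup of the sorted multiset with the same members
theorem pv_main (l1 l2 : List String) (h1 : l1.Nodup)
    (hm : ∀ x, x ∈ l1 ↔ x ∈ l2) :
    PySem.List.sorted l1 (fun x => x) false
      = pvDD none (PySem.List.sorted l2 (fun x => x) false) := by
  set s1 := PySem.List.sorted l1 (fun x => x) false with hs1
  set s2 := PySem.List.sorted l2 (fun x => x) false with hs2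
  have hperm1 : s1.Perm l1 := PySem.List.sorted_perm l1 _ false
  have hperm2 : s2.Perm l2 := PySem.List.sorted_perm l2 _ false
  have hs1n : s1.Nodup := hperm1.nodup_iff.mpr h1
  have hs1p : s1.Pairwise (· ≤ ·) := PySem.List.sorted_pairwise l1 (fun x => x)
  have hs2p : s2.Pairwise (· ≤ ·) := PySem.List.sorted_pairwise l2 (fun x => x)
  obtain ⟨hdp, hdm⟩ := pv_dd_strict s2 none hs2p (by intro p hp; cases hp)
  have hs1lt : s1.Pairwise (· < ·) := by
    have := List.Pairwise.and hs1p hs1n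
    exact this.imp (fun h => lt_of_le_of_ne h.1 h.2)
  have hddn : (pvDD none s2).Nodup := hdp.imp (fun h => ne_of_lt h)
  have hmem : ∀ x, x ∈ s1 ↔ x ∈ pvDD none s2 := by
    intro x
    rw [hperm1.mem_iff, hm x, ← hperm2.mem_iff]
    have := pv_dd_mem s2 none x
    simp only [reduceCtorEq, or_false] at this
    exact this.symm
  have hpm : s1.Perm (pvDD none s2) :=
    (List.perm_ext_iff_of_nodup hs1n hddn).mpr hmem
  exact List.Perm.eq_of_pairwise (fun a b _ _ h1 h2 => le_antisymm h1 h2)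
    (hs1lt.imp le_of_lt) (hdp.imp le_of_lt) hpm

-- ===== VERDICT (by name: the statement is the Claim_ definition above) =====
theorem normalize_hold_jid_py_spec : Claim_equal_normalize_hold_jid_py := by
  intro ids _
  unfold Spec_normalize_hold_jid_py normalize_hold_jid_py normalize_hold_jid_py_alt
  simp only
  rw [show (fun (st : List String × PySem.Set String) value =>
        let token := PySem.Str.strip value
        if token = "" ∨ token ∈ st.2 then st
        else (st.1 ++ [token], PySem.Set.add st.2 token)) = pvStepA from rfl]
  rw [show (fun (acc : List String) value =>
        let token := PySem.Str.strip value
        if token ≠ "" then acc ++ [token] else acc) = pvStepB from rfl]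
  rw [pv_flatten pvStepA (fun j => (PySem.Str.split? j ",").getD []) ids,
      pv_flatten pvStepB (fun j => (PySem.Str.split? j ",").getD []) ids]
  set vals := ids.flatMap (fun j => (PySem.Str.split? j ",").getD []) with hvals
  obtain ⟨hnodup, hmem⟩ := pv_A_invariant vals [] (PySem.Set.ofList [])
    List.nodup_nil (by simp [PySem.Set.ofList])
  set norm := (vals.foldl pvStepA ([], PySem.Set.ofList [])).1 with hnorm
  set F := (vals.map PySem.Str.strip).filter (fun t => t ≠ "") with hF
  rw [pv_B_collect vals [], List.nil_append]
  rw [pv_B_dd (PySem.List.sorted F (fun x => x) false) [] none, List.nil_append]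
  have hmain : PySem.List.sorted norm (fun x => x) false
      = pvDD none (PySem.List.sorted F (fun x => x) false) :=
    pv_main norm F hnodup (by intro x; rw [hmem x]; simp)
  by_cases hn : norm = []
  · have hF0 : F = [] := by
      rw [List.eq_nil_iff_forall_not_mem]
      intro x hx
      have : x ∈ norm := (hmem x).mpr (Or.inr hx)
      simp [hn] at this
    have : pvDD none (PySem.List.sorted F (fun x => x) false) = [] := by
      simp [hF0, PySem.List.sorted, pvDD]
    rw [if_pos hn, if_pos this]
  · have : pvDD none (PySem.List.sorted F (fun x => x) false) ≠ [] := by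
      rw [← hmain, Ne, PySem.List.sorted_eq_nil_iff]
      exact hn
    rw [if_neg hn, if_neg this, hmain]
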